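-- pv_equiv track=rewrite | github.com/boldar99/FT-circuit-synthesis-ZX | spiderstate/utils.py | _layer_circuit_ops
-- ===== SOURCE A (Python) =====
-- from collections import defaultdict
-- from collections import defaultdict
--
-- def _layer_circuit_ops(operations: list[tuple[str, list[int]]], num_qubits: int):
--     # Minor correction: range(num_qubits) avoids creating a ghost qubit tracker
--     all_qubits = range(num_qubits)
--
--     # --- PASS 1: ASAP Forward Layering ---
--     next_free_layer = {q: 0 for q in all_qubits}
--     asap_layers = defaultdict(list)
--
--     for op_name, targets in operations:
--         # Note: If you pass "MR" in here, it will be kept as one block.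
--         # For optimal noise, you should preprocess your operations list
--         # to convert ("MR", targets) into ("M", targets) and ("R", targets)
--         # before calling this function!
--
--         last_layer = max((next_free_layer[i] for i in targets), default=0)
--         asap_layers[last_layer].append((op_name, targets))
--
--         for i in targets:
--             next_free_layer[i] = last_layer + 1
--
--     # Convert dict to a dense list of lists
--     max_layer = max(asap_layers.keys(), default=-1)
--     layers = [asap_layers[i] for i in range(max_layer + 1)]
--
--     # --- PASS 2: ALAP Backward Reset Shifting ---
--     # Track the exact layer index where a qubit is NEXT used.
--     # Initialize to the length of layers (representing the end of the circuit)
--     next_required = {q: len(layers) for q in all_qubits}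
--
--     # Iterate backwards through the ASAP layers
--     for i in range(len(layers) - 1, -1, -1):
--         current_layer_ops = layers[i]
--         kept_ops = []
--
--         for op_name, targets in current_layer_ops:
--             if op_name in {"R", "RX"}:
--                 # Splinter the reset: Handle each qubit independently
--                 for t in targets:
--                     target_layer = next_required[t] - 1
--
--                     if target_layer > i:
--                         # Push this specific qubit's reset forward in time
--                         layers[target_layer].append((op_name, [t]))
--                     else:
--                         # It's already as late as it can be, keep it here
--                         kept_ops.append((op_name, [t]))
--             else:
--                 # Keep normal gates where they are
--                 kept_ops.append((op_name, targets))
--                 # Mark these qubits as required at the current layer i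
--                 for t in targets:
--                     next_required[t] = i
--
--         # Update the current layer with only the operations that didn't get pushed
--         layers[i] = kept_ops
--
--     # --- PASS 3: Cleanup ---
--     # Shifting resets out of early layers might leave some layers completely empty.
--     # We strip them out to prevent unnecessary DEPOLARIZE1 idle cycles in your noise model.
--     return [layer for layer in layers if layer]
-- ===== SOURCE B (Python) =====
-- def _layer_circuit_ops(operations: list[tuple[str, list[int]]], num_qubits: int):
--     # PASS 1: ASAP layering, growing the dense layer list directly (no
--     # intermediate defaultdict / densification step).
--     next_free = {t: 0 for t in range(num_qubits)}
--     layers = []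
--     for op_name, targets in operations:
--         layer = max((next_free[t] for t in targets), default=0)
--         if layer == len(layers):
--             layers.append([])
--         layers[layer].append((op_name, targets))
--         for t in targets:
--             next_free[t] = layer + 1
--     n = len(layers)
--
--     # PASS 2a: per-qubit index: the (increasing) list of layers holding a
--     # non-reset op that uses the qubit.
--     uses = {}
--     for i, layer in enumerate(layers):
--         for op_name, targets in layer:
--             if op_name not in ("R", "RX"):
--                 for t in targets:
--                     uses.setdefault(t, []).append(i)
--
--     # PASS 2b: classify every op of every layer against the use index:
--     # a reset on qubit t sitting in layer i belongs just before the first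
--     # non-reset use of t after i (ALAP), else it stays where it is.
--     kept = []
--     pushed = []  # per source layer: list of (destination layer, splintered reset)
--     for i, layer in enumerate(layers):
--         ks, ps = [], []
--         for op_name, targets in layer:
--             if op_name in ("R", "RX"):
--                 for t in targets:
--                     dest = _first_after(uses.get(t, []), i, n) - 1
--                     if dest > i:
--                         ps.append((dest, (op_name, [t])))
--                     else:
--                         ks.append((op_name, [t]))
--             else:
--                 ks.append((op_name, targets))
--         kept.append(ks)
--         pushed.append(ps)
--
--     # PASS 3: assemble — pushed resets land after the kept ops of their
--     # destination layer, later source layers first; drop empty layers.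
--     out = []
--     for j in range(n):
--         layer = kept[j] + [op for ps in reversed(pushed) for d, op in ps if d == j]
--         if layer:
--             out.append(layer)
--     return out
--
--
-- def _first_after(use_layers, i, n):
--     for j in use_layers:
--         if j > i:
--             return j
--     return n
-- ===== Notes on version B (the rewrite author's own statement) =====
-- stated objective: alternative
-- what changed: A's stateful backward sweep that mutates later layers in place is replaced by a per-qubit sorted use-layer index built in one forward scan; each reset is then placed independently at (first non-reset use after its layer) - 1 in a forward classification pass, and the layers are assembled from the kept/pushed tables (pass 1 also builds the dense layer list directly instead of a defaultdict densified afterwards).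
import Mathlib
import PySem

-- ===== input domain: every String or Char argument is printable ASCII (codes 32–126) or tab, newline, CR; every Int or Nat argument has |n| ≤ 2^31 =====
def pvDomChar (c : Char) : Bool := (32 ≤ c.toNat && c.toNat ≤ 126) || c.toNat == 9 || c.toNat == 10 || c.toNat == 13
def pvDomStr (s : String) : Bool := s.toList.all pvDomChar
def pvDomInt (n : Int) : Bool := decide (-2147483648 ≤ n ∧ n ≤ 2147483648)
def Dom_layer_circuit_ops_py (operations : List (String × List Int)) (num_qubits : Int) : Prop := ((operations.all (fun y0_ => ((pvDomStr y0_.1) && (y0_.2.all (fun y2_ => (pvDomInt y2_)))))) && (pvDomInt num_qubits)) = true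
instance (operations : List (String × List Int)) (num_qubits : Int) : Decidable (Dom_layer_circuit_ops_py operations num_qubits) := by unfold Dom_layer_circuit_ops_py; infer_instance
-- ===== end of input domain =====

-- B replaces A's stateful ALAP backward sweep (which mutates later layers in place while
-- tracking next_required) by a per-qubit index of non-reset use layers built in one forward
-- scan; every reset is then placed independently at (first use after its layer) - 1 in a
-- forward classification pass, and the result is assembled from the kept/pushed tables.
-- Pass 1 also grows the dense layer list directly instead of a defaultdict densified later.
-- Objective: alternative (same observable result, no speed claim).

-- ===== PORT A =====
def pvAsap (operations : List (String × List Int)) (num_qubits : Int) :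
    List (List (String × List Int)) :=
  let nf0 : PySem.Dict Int Int :=
    (PySem.List.pyRange 0 num_qubits 1).foldl (fun d q => d.insert q 0) PySem.Dict.empty
  let st := operations.foldl
    (fun (st : PySem.Dict Int Int × PySem.Dict Int (List (String × List Int))) op =>
      let last := PySem.List.maxD (op.2.map (fun t => st.1.getD t 0)) (fun x => x) 0
      (op.2.foldl (fun d t => d.insert t (last + 1)) st.1,
       st.2.modify last [] (· ++ [op])))
    (nf0, PySem.Dict.empty)
  let maxLayer := PySem.List.maxD st.2.keys (fun x => x) (-1)
  (PySem.List.pyRange 0 (maxLayer + 1) 1).map (fun i => st.2.getD i [])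

def pvInitNR (num_qubits n : Int) : PySem.Dict Int Int :=
  (PySem.List.pyRange 0 num_qubits 1).foldl (fun d q => d.insert q n) PySem.Dict.empty

def pvIsReset (name : String) : Bool := name == "R" || name == "RX"

-- A-side pass 2: mutate the dense layer list in place, pushing each reset's qubit forward
def pvResetStepA (i : Int) (name : String)
    (s : List (String × List Int) × List (List (String × List Int)) × PySem.Dict Int Int)
    (t : Int) :
    List (String × List Int) × List (List (String × List Int)) × PySem.Dict Int Int :=
  let tl := s.2.2.getD t 0 - 1
  if tl > i then
    (s.1, PySem.List.pySetD s.2.1 tl (PySem.List.pyGetD s.2.1 tl [] ++ [(name, [t])]), s.2.2)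
  else
    (s.1 ++ [(name, [t])], s.2.1, s.2.2)

def pvOpStepA (i : Int)
    (s : List (String × List Int) × List (List (String × List Int)) × PySem.Dict Int Int)
    (op : String × List Int) :
    List (String × List Int) × List (List (String × List Int)) × PySem.Dict Int Int :=
  if pvIsReset op.1 then
    op.2.foldl (pvResetStepA i op.1) s
  else
    (s.1 ++ [op], s.2.1, op.2.foldl (fun d t => d.insert t i) s.2.2)

def pvStepA (st : List (List (String × List Int)) × PySem.Dict Int Int) (i : Int) :
    List (List (String × List Int)) × PySem.Dict Int Int :=
  let inner := (PySem.List.pyGetD st.1 i []).foldl (pvOpStepA i) ([], st.1, st.2)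
  (PySem.List.pySetD inner.2.1 i inner.1, inner.2.2)

def layer_circuit_ops_py (operations : List (String × List Int)) (num_qubits : Int) :
    List (List (String × List Int)) :=
  let layers0 := pvAsap operations num_qubits
  let n : Int := layers0.length
  let st := (PySem.List.pyRange (n - 1) (-1) (-1)).foldl pvStepA (layers0, pvInitNR num_qubits n)
  st.1.filter (fun l => !l.isEmpty)

-- ===== PORT B =====
-- pass 1: ASAP layering over the fixed qubit register, growing the dense layer list directly
def pvPass1Step (st : PySem.Dict Int Int × List (List (String × List Int)))
    (op : String × List Int) : PySem.Dict Int Int × List (List (String × List Int)) :=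
  let layer := PySem.List.maxD (op.2.map (fun t => st.1.getD t 0)) (fun x => x) 0
  let ls := if layer == (st.2.length : Int) then st.2 ++ [[]] else st.2
  (op.2.foldl (fun d t => d.insert t (layer + 1)) st.1,
   PySem.List.pySetD ls layer (PySem.List.pyGetD ls layer [] ++ [op]))

def pvPass1 (operations : List (String × List Int)) (num_qubits : Int) :
    List (List (String × List Int)) :=
  let nf0 : PySem.Dict Int Int :=
    (PySem.List.pyRange 0 num_qubits 1).foldl (fun d q => d.insert q 0) PySem.Dict.empty
  (operations.foldl pvPass1Step (nf0, [])).2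

-- pass 2a: per-qubit (increasing) list of layers holding a non-reset op on that qubit
def pvUsesOp (i : Int) (u : PySem.Dict Int (List Int)) (op : String × List Int) :
    PySem.Dict Int (List Int) :=
  if pvIsReset op.1 then u
  else op.2.foldl (fun u t => u.modify t [] (· ++ [i])) u

def pvUses (L : List (List (String × List Int))) : PySem.Dict Int (List Int) :=
  (PySem.List.enumerate L).foldl (fun u p => p.2.foldl (pvUsesOp p.1) u) PySem.Dict.empty

-- the first element of us greater than i, else n  (Python helper _first_after)
def pvFirstAfter (us : List Int) (i n : Int) : Int :=
  match us with
  | [] => n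
  | j :: rest => if j > i then j else pvFirstAfter rest i n

-- pass 2b: classify a layer's ops against the use index
def pvClassifyReset (uses : PySem.Dict Int (List Int)) (n i : Int) (name : String)
    (s : List (String × List Int) × List (Int × (String × List Int))) (t : Int) :
    List (String × List Int) × List (Int × (String × List Int)) :=
  let dest := pvFirstAfter (uses.getD t []) i n - 1
  if dest > i then (s.1, s.2 ++ [(dest, (name, [t]))])
  else (s.1 ++ [(name, [t])], s.2)

def pvClassifyOp (uses : PySem.Dict Int (List Int)) (n i : Int)
    (s : List (String × List Int) × List (Int × (String × List Int)))
    (op : String × List Int) :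
    List (String × List Int) × List (Int × (String × List Int)) :=
  if pvIsReset op.1 then op.2.foldl (pvClassifyReset uses n i op.1) s
  else (s.1 ++ [op], s.2)

def pvClassify (uses : PySem.Dict Int (List Int)) (n : Int)
    (L : List (List (String × List Int))) :
    List (List (String × List Int)) × List (List (Int × (String × List Int))) :=
  (PySem.List.enumerate L).foldl
    (fun acc p =>
      let r := p.2.foldl (pvClassifyOp uses n p.1) ([], [])
      (acc.1 ++ [r.1], acc.2 ++ [r.2]))
    ([], [])

def layer_circuit_ops_py_alt (operations : List (String × List Int)) (num_qubits : Int) :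
    List (List (String × List Int)) :=
  let L := pvPass1 operations num_qubits
  let n : Int := L.length
  let uses := pvUses L
  let kp := pvClassify uses n L
  (PySem.List.pyRange 0 n 1).foldl
    (fun out j =>
      let lay := PySem.List.pyGetD kp.1 j [] ++
        kp.2.reverse.flatMap (fun ps => (ps.filter (fun q => q.1 == j)).map (·.2))
      if lay.isEmpty then out else out ++ [lay])
    []

-- ===== PRECONDITION & SPEC =====
-- Pre_ excludes exactly the inputs on which Python A raises KeyError: some target qubit
-- outside range(num_qubits).
def Pre_layer_circuit_ops_py (operations : List (String × List Int)) (num_qubits : Int) : Prop :=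
  ∀ op ∈ operations, ∀ t ∈ op.2, 0 ≤ t ∧ t < num_qubits
instance (operations : List (String × List Int)) (num_qubits : Int) : Decidable (Pre_layer_circuit_ops_py operations num_qubits) := by unfold Pre_layer_circuit_ops_py; infer_instance

def pvWitness_layer_circuit_ops_py : (List (String × List Int)) × Int :=
  ([("M", [0, 1]), ("R", [0]), ("X", [1]), ("X", [0])], 2)

def Spec_layer_circuit_ops_py (operations : List (String × List Int)) (num_qubits : Int) (out : List (List (String × List Int))) : Prop := out = layer_circuit_ops_py_alt operations num_qubits
instance (operations : List (String × List Int)) (num_qubits : Int) (out : List (List (String × List Int))) : Decidable (Spec_layer_circuit_ops_py operations num_qubits out) := by unfold Spec_layer_circuit_ops_py; infer_instance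

-- ===== CLAIM (what is proved, stated in full; the proofs are below) =====
def Claim_equal_layer_circuit_ops_py : Prop := ∀ (operations : List (String × List Int)) (num_qubits : Int), Dom_layer_circuit_ops_py operations num_qubits → Pre_layer_circuit_ops_py operations num_qubits → Spec_layer_circuit_ops_py operations num_qubits (layer_circuit_ops_py operations num_qubits)

-- ===== LEMMAS AND PROOFS =====

-- ---------- proof-side middle machine: A's pass 2 with the pushes kept in a flat list ----------
def pvMResetStep (i : Int) (name : String)
    (s : PySem.Dict Int Int × List (String × List Int) × List (Int × (String × List Int)))
    (t : Int) :
    PySem.Dict Int Int × List (String × List Int) × List (Int × (String × List Int)) :=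
  let j := s.1.getD t 0 - 1
  if j > i then (s.1, s.2.1, s.2.2 ++ [(j, (name, [t]))])
  else (s.1, s.2.1 ++ [(name, [t])], s.2.2)

def pvMOpStep (i : Int)
    (s : PySem.Dict Int Int × List (String × List Int) × List (Int × (String × List Int)))
    (op : String × List Int) :
    PySem.Dict Int Int × List (String × List Int) × List (Int × (String × List Int)) :=
  if pvIsReset op.1 then
    op.2.foldl (pvMResetStep i op.1) s
  else
    (op.2.foldl (fun d t => d.insert t i) s.1, s.2.1 ++ [op], s.2.2)

def pvMStep (layers0 : List (List (String × List Int)))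
    (st : PySem.Dict Int Int × List (List (String × List Int)) × List (Int × (String × List Int)))
    (i : Int) :
    PySem.Dict Int Int × List (List (String × List Int)) × List (Int × (String × List Int)) :=
  let inner := (PySem.List.pyGetD layers0 i []).foldl (pvMOpStep i) (st.1, [], st.2.2)
  (inner.1, st.2.1 ++ [inner.2.1], inner.2.2)

-- proof-side view of the assembled layers m, m+1, … : kv.reverse plus the pushes
def pvAsm (m : Int) (kv : List (List (String × List Int)))
    (P : List (Int × (String × List Int))) : List (List (String × List Int)) :=
  kv.reverse.mapIdx (fun k ks => ks ++ (P.filter (fun q => q.1 == m + (k : Int))).map (·.2))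

lemma pvAsm_length (m : Int) (kv : List (List (String × List Int)))
    (P : List (Int × (String × List Int))) : (pvAsm m kv P).length = kv.length := by
  simp [pvAsm]

lemma pvAsm_getElem (m : Int) (kv : List (List (String × List Int)))
    (P : List (Int × (String × List Int))) (k : Nat) (hk : k < kv.length) :
    (pvAsm m kv P)[k]'(by simp [pvAsm_length, hk]) =
      kv.reverse[k]'(by simp [hk]) ++ (P.filter (fun q => q.1 == m + (k : Int))).map (·.2) := by
  simp only [pvAsm, List.getElem_mapIdx]

-- push-bound and next_required-bound invariants
def pvPB (n m : Int) (P : List (Int × (String × List Int))) : Prop :=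
  ∀ p ∈ P, m ≤ p.1 ∧ p.1 < n

def pvNB (n : Int) (nr : PySem.Dict Int Int) : Prop :=
  ∀ t : Int, nr.getD t 0 ≤ n

lemma pvNB_insert_fold (n i : Int) (hi : i ≤ n) (l : List Int) :
    ∀ (nr : PySem.Dict Int Int), pvNB n nr →
      pvNB n (l.foldl (fun d t => d.insert t i) nr) := by
  induction l with
  | nil => intro nr h; exact h
  | cons t l ih =>
    intro nr h
    refine ih _ ?_
    intro t'
    rw [PySem.Dict.getD_insert]
    split
    · exact hi
    · exact h t'

lemma pvInitNR_NB (q n : Int) (hn : 0 ≤ n) : pvNB n (pvInitNR q n) := by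
  unfold pvInitNR
  refine pvNB_insert_fold n n le_rfl _ PySem.Dict.empty ?_
  intro t
  simp [PySem.Dict.getD_empty]
  exact hn

-- normal form of the hybrid layer list A maintains during pass 2
lemma pvHyb_length (L0 : List (List (String × List Int))) (m : Nat) (hm : m ≤ L0.length)
    (kv : List (List (String × List Int))) (P : List (Int × (String × List Int)))
    (hkv : kv.length + m = L0.length) :
    (L0.take m ++ pvAsm (m : Int) kv P).length = L0.length := by
  simp [pvAsm_length]
  omega

lemma pvHyb_getElem (L0 : List (List (String × List Int))) (m : Nat) (hm : m ≤ L0.length)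
    (kv : List (List (String × List Int))) (P : List (Int × (String × List Int)))
    (hkv : kv.length + m = L0.length) (k : Nat) (hk : k < L0.length) :
    (L0.take m ++ pvAsm (m : Int) kv P)[k]'(by rw [pvHyb_length L0 m hm kv P hkv]; exact hk) =
      if h : k < m then L0[k]'hk
      else (kv.reverse[k - m]'(by simp; omega)) ++
        (P.filter (fun q => q.1 == (k : Int))).map (·.2) := by
  have hT : (L0.take m).length = m := by simp [List.length_take]; omega
  split
  · next h =>
    rw [List.getElem_append_left (by omega)]
    simp [List.getElem_take]
  · next h =>
    rw [List.getElem_append_right (by omega)]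
    rw [pvAsm_getElem (m : Int) kv P _ (by omega)]
    simp only [hT]
    simp only [show ((m : Int) + ((k - m : Nat) : Int)) = (k : Int) from by omega]

-- A's in-layer push equals appending the push to the machine's flat push list
lemma pvAsm_push (L0 : List (List (String × List Int))) (m : Nat) (hm : m ≤ L0.length)
    (kv : List (List (String × List Int))) (P : List (Int × (String × List Int)))
    (hkv : kv.length + m = L0.length) (tl : Int) (h1 : (m : Int) ≤ tl)
    (h2 : tl < (L0.length : Int)) (x : String × List Int) :
    PySem.List.pySetD (L0.take m ++ pvAsm (m : Int) kv P) tl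
        (PySem.List.pyGetD (L0.take m ++ pvAsm (m : Int) kv P) tl [] ++ [x]) =
      L0.take m ++ pvAsm (m : Int) kv (P ++ [(tl, x)]) := by
  have h0 : (0 : Int) ≤ tl := by omega
  have hlen := pvHyb_length L0 m hm kv P hkv
  have hlt : tl < ((L0.take m ++ pvAsm (m : Int) kv P).length : Int) := by
    rw [hlen]; exact_mod_cast h2
  rw [PySem.List.pySetD_of_nonneg _ _ h0, PySem.List.pyGetD_eq_getElem _ _ h0 hlt]
  apply List.ext_getElem
  · rw [List.length_set, hlen, pvHyb_length L0 m hm kv _ hkv]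
  · intro k hk1 hk2
    rw [List.length_set, hlen] at hk1
    rw [List.getElem_set]
    rw [pvHyb_getElem L0 m hm kv (P ++ [(tl, x)]) hkv k hk1]
    split
    · next heq =>
      have hkm : ¬ k < m := by omega
      rw [dif_neg hkm]
      have htk : tl = (k : Int) := by omega
      have hg : (L0.take m ++ pvAsm (m : Int) kv P)[tl.toNat]'(by omega) =
          (kv.reverse[k - m]'(by simp; omega)) ++
            (P.filter (fun q => q.1 == (k : Int))).map (·.2) := by
        have htn : tl.toNat = k := by omega
        rw [pvHyb_getElem L0 m hm kv P hkv tl.toNat (by omega)]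
        rw [dif_neg (by omega : ¬ tl.toNat < m)]
        simp only [htn]
      rw [hg, List.filter_append, List.map_append, List.append_assoc]
      congr 2
      simp [htk]
    · next hne =>
      rw [pvHyb_getElem L0 m hm kv P hkv k hk1]
      split
      · rfl
      · next h =>
        rw [List.filter_append, List.map_append]
        have : (([(tl, x)].filter (fun q => q.1 == (k : Int))) : List (Int × (String × List Int))) = [] := by
          simp
          omega
        rw [this]
        simp

-- writing back the kept ops of layer m-1 extends kv
lemma pvAsm_close (L0 : List (List (String × List Int))) (m : Nat) (h1 : 1 ≤ m)
    (hm : m ≤ L0.length) (kv : List (List (String × List Int)))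
    (P : List (Int × (String × List Int))) (ks : List (String × List Int))
    (hkv : kv.length + m = L0.length) (hP : ∀ p ∈ P, (m : Int) ≤ p.1) :
    PySem.List.pySetD (L0.take m ++ pvAsm (m : Int) kv P) ((m : Int) - 1) ks =
      L0.take (m - 1) ++ pvAsm ((m : Int) - 1) (kv ++ [ks]) P := by
  have h0 : (0 : Int) ≤ (m : Int) - 1 := by omega
  have hlen := pvHyb_length L0 m hm kv P hkv
  rw [PySem.List.pySetD_of_nonneg _ _ h0]
  have hmm : ((m : Int) - 1).toNat = m - 1 := by omega
  rw [hmm]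
  have hkv' : (kv ++ [ks]).length + (m - 1) = L0.length := by simp; omega
  have e1 : ((m - 1 : Nat) : Int) = (m : Int) - 1 := by omega
  apply List.ext_getElem
  · rw [List.length_set, hlen, ← e1, pvHyb_length L0 (m - 1) (by omega) (kv ++ [ks]) P hkv']
  · intro k hk1 hk2
    rw [List.length_set, hlen] at hk1
    rw [List.getElem_set]
    have := pvHyb_getElem L0 (m - 1) (by omega) (kv ++ [ks]) P hkv' k hk1
    simp only [e1] at this
    rw [this]
    split
    · next heq =>
      rw [dif_neg (by omega : ¬ k < m - 1)]
      have hrev : ((kv ++ [ks]).reverse[k - (m - 1)]'(by simp; omega)) = ks := by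
        have : k - (m - 1) = 0 := by omega
        simp [this]
      rw [hrev]
      have hfil : (P.filter (fun q => q.1 == (k : Int))) = [] := by
        rw [List.filter_eq_nil_iff]
        intro p hp
        have := hP p hp
        simp
        omega
      rw [hfil]
      simp
    · next hne =>
      rw [pvHyb_getElem L0 m hm kv P hkv k hk1]
      split
      · next h =>
        rw [dif_pos (by omega : k < m - 1)]
      · next h =>
        rw [dif_neg (by omega : ¬ k < m - 1)]
        congr 1
        simp only [List.reverse_append, List.reverse_singleton]
        rw [List.getElem_append_right (by simp; omega)]
        congr 1
        simp only [List.length_singleton]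
        omega

-- reading the still-untouched layer i < m out of the hybrid list
lemma pvGet_prefix (L0 : List (List (String × List Int))) (m : Nat) (hm : m ≤ L0.length)
    (kv : List (List (String × List Int))) (P : List (Int × (String × List Int)))
    (hkv : kv.length + m = L0.length) (i : Int) (h0 : 0 ≤ i) (hi : i < (m : Int)) :
    PySem.List.pyGetD (L0.take m ++ pvAsm (m : Int) kv P) i [] =
      PySem.List.pyGetD L0 i [] := by
  have hlen := pvHyb_length L0 m hm kv P hkv
  have hiL : i < ((L0.take m ++ pvAsm (m : Int) kv P).length : Int) := by rw [hlen]; omega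
  have hiL0 : i < (L0.length : Int) := by omega
  rw [PySem.List.pyGetD_eq_getElem _ _ h0 hiL, PySem.List.pyGetD_eq_getElem _ _ h0 hiL0]
  rw [pvHyb_getElem L0 m hm kv P hkv i.toNat (by omega)]
  rw [dif_pos (by omega : i.toNat < m)]

-- one reset op's per-qubit fold preserves the relation between A's and the machine's states
lemma pvReset_fold (L0 : List (List (String × List Int))) (m : Nat) (_h1 : 1 ≤ m)
    (hm : m ≤ L0.length) (kv : List (List (String × List Int)))
    (hkv : kv.length + m = L0.length) (name : String) (ts : List Int) :
    ∀ (kept : List (String × List Int)) (P : List (Int × (String × List Int)))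
      (nr : PySem.Dict Int Int), pvPB (L0.length : Int) (m : Int) P →
      pvNB (L0.length : Int) nr →
      ts.foldl (pvResetStepA ((m : Int) - 1) name) (kept, L0.take m ++ pvAsm (m : Int) kv P, nr) =
        ((ts.foldl (pvMResetStep ((m : Int) - 1) name) (nr, kept, P)).2.1,
         L0.take m ++ pvAsm (m : Int) kv
           ((ts.foldl (pvMResetStep ((m : Int) - 1) name) (nr, kept, P)).2.2),
         nr) ∧
      (ts.foldl (pvMResetStep ((m : Int) - 1) name) (nr, kept, P)).1 = nr ∧
      pvPB (L0.length : Int) (m : Int)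
        (ts.foldl (pvMResetStep ((m : Int) - 1) name) (nr, kept, P)).2.2 := by
  induction ts with
  | nil => intro kept P nr hP hnr; exact ⟨rfl, rfl, hP⟩
  | cons t ts ih =>
    intro kept P nr hP hnr
    simp only [List.foldl_cons]
    by_cases hc : nr.getD t 0 - 1 > (m : Int) - 1
    · have hA : pvResetStepA ((m : Int) - 1) name (kept, L0.take m ++ pvAsm (m : Int) kv P, nr) t =
          (kept, L0.take m ++ pvAsm (m : Int) kv (P ++ [(nr.getD t 0 - 1, (name, [t]))]), nr) := by
        simp only [pvResetStepA]
        rw [if_pos hc]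
        rw [pvAsm_push L0 m hm kv P hkv _ (by omega) (by have := hnr t; omega) _]
      have hB : pvMResetStep ((m : Int) - 1) name (nr, kept, P) t =
          (nr, kept, P ++ [(nr.getD t 0 - 1, (name, [t]))]) := by
        simp only [pvMResetStep]
        rw [if_pos hc]
      rw [hA, hB]
      refine ih kept _ nr ?_ hnr
      intro p hp
      rcases List.mem_append.mp hp with h | h
      · exact hP p h
      · simp only [List.mem_singleton] at h
        subst h
        exact ⟨show (m : Int) ≤ nr.getD t 0 - 1 by omega,
               show nr.getD t 0 - 1 < ((L0.length : Nat) : Int) by have := hnr t; omega⟩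
    · have hA : pvResetStepA ((m : Int) - 1) name (kept, L0.take m ++ pvAsm (m : Int) kv P, nr) t =
          (kept ++ [(name, [t])], L0.take m ++ pvAsm (m : Int) kv P, nr) := by
        simp only [pvResetStepA]
        rw [if_neg hc]
      have hB : pvMResetStep ((m : Int) - 1) name (nr, kept, P) t =
          (nr, kept ++ [(name, [t])], P) := by
        simp only [pvMResetStep]
        rw [if_neg hc]
      rw [hA, hB]
      exact ih _ P nr hP hnr

-- the whole in-layer op fold preserves the relation
lemma pvOp_fold (L0 : List (List (String × List Int))) (m : Nat) (h1 : 1 ≤ m)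
    (hm : m ≤ L0.length) (kv : List (List (String × List Int)))
    (hkv : kv.length + m = L0.length) (cur : List (String × List Int)) :
    ∀ (kept : List (String × List Int)) (P : List (Int × (String × List Int)))
      (nr : PySem.Dict Int Int), pvPB (L0.length : Int) (m : Int) P →
      pvNB (L0.length : Int) nr →
      cur.foldl (pvOpStepA ((m : Int) - 1)) (kept, L0.take m ++ pvAsm (m : Int) kv P, nr) =
        ((cur.foldl (pvMOpStep ((m : Int) - 1)) (nr, kept, P)).2.1,
         L0.take m ++ pvAsm (m : Int) kv
           ((cur.foldl (pvMOpStep ((m : Int) - 1)) (nr, kept, P)).2.2),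
         (cur.foldl (pvMOpStep ((m : Int) - 1)) (nr, kept, P)).1) ∧
      pvPB (L0.length : Int) (m : Int)
        (cur.foldl (pvMOpStep ((m : Int) - 1)) (nr, kept, P)).2.2 ∧
      pvNB (L0.length : Int) (cur.foldl (pvMOpStep ((m : Int) - 1)) (nr, kept, P)).1 := by
  induction cur with
  | nil => intro kept P nr hP hnr; exact ⟨rfl, hP, hnr⟩
  | cons op ops ih =>
    intro kept P nr hP hnr
    simp only [List.foldl_cons]
    by_cases hr : pvIsReset op.1
    · have hA : pvOpStepA ((m : Int) - 1) (kept, L0.take m ++ pvAsm (m : Int) kv P, nr) op =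
          op.2.foldl (pvResetStepA ((m : Int) - 1) op.1) (kept, L0.take m ++ pvAsm (m : Int) kv P, nr) := by
        simp only [pvOpStepA]
        rw [if_pos hr]
      have hB : pvMOpStep ((m : Int) - 1) (nr, kept, P) op =
          op.2.foldl (pvMResetStep ((m : Int) - 1) op.1) (nr, kept, P) := by
        simp only [pvMOpStep]
        rw [if_pos hr]
      rw [hA, hB]
      obtain ⟨hEq, hNr, hPb⟩ := pvReset_fold L0 m h1 hm kv hkv op.1 op.2 kept P nr hP hnr
      rw [hEq]
      have e := ih (op.2.foldl (pvMResetStep ((m : Int) - 1) op.1) (nr, kept, P)).2.1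
        (op.2.foldl (pvMResetStep ((m : Int) - 1) op.1) (nr, kept, P)).2.2 nr hPb hnr
      rw [show ((nr, (op.2.foldl (pvMResetStep ((m : Int) - 1) op.1) (nr, kept, P)).2.1,
          (op.2.foldl (pvMResetStep ((m : Int) - 1) op.1) (nr, kept, P)).2.2) :
          PySem.Dict Int Int × List (String × List Int) × List (Int × (String × List Int))) =
          op.2.foldl (pvMResetStep ((m : Int) - 1) op.1) (nr, kept, P) from Prod.ext hNr.symm rfl] at e
      exact e
    · have hA : pvOpStepA ((m : Int) - 1) (kept, L0.take m ++ pvAsm (m : Int) kv P, nr) op =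
          (kept ++ [op], L0.take m ++ pvAsm (m : Int) kv P,
           op.2.foldl (fun d t => d.insert t ((m : Int) - 1)) nr) := by
        simp only [pvOpStepA]
        rw [if_neg hr]
      have hB : pvMOpStep ((m : Int) - 1) (nr, kept, P) op =
          (op.2.foldl (fun d t => d.insert t ((m : Int) - 1)) nr, kept ++ [op], P) := by
        simp only [pvMOpStep]
        rw [if_neg hr]
      rw [hA, hB]
      exact ih _ P _ hP (pvNB_insert_fold _ _ (by omega) _ nr hnr)

-- backward outer loop: A's mutated layers equal the machine's assembled layers
lemma pvOuter (L0 : List (List (String × List Int))) :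
    ∀ (m : Nat), m ≤ L0.length →
    ∀ (kv : List (List (String × List Int))) (P : List (Int × (String × List Int)))
      (nr : PySem.Dict Int Int), kv.length + m = L0.length →
      pvPB (L0.length : Int) (m : Int) P → pvNB (L0.length : Int) nr →
      ((PySem.List.pyRange ((m : Int) - 1) (-1) (-1)).foldl pvStepA
          (L0.take m ++ pvAsm (m : Int) kv P, nr)).1 =
        pvAsm 0
          (((PySem.List.pyRange ((m : Int) - 1) (-1) (-1)).foldl (pvMStep L0) (nr, kv, P)).2.1)
          (((PySem.List.pyRange ((m : Int) - 1) (-1) (-1)).foldl (pvMStep L0) (nr, kv, P)).2.2) := by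
  intro m
  induction m with
  | zero =>
    intro _ kv P nr hkv hP hnr
    rw [PySem.List.pyRange_neg_one_eq_nil (by omega)]
    simp
  | succ m ih =>
    intro hm kv P nr hkv hP hnr
    have hcons := PySem.List.pyRange_neg_one_cons
      (a := ((m + 1 : Nat) : Int) - 1) (b := -1) (by omega)
    rw [show ((m + 1 : Nat) : Int) - 1 - 1 = ((m : Nat) : Int) - 1 from by omega] at hcons
    rw [hcons]
    simp only [List.foldl_cons]
    have hget : PySem.List.pyGetD (L0.take (m + 1) ++ pvAsm ((m + 1 : Nat) : Int) kv P)
        (((m + 1 : Nat) : Int) - 1) [] = PySem.List.pyGetD L0 (((m + 1 : Nat) : Int) - 1) [] :=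
      pvGet_prefix L0 (m + 1) hm kv P hkv _ (by omega) (by omega)
    obtain ⟨hEq, hPb, hNb⟩ := pvOp_fold L0 (m + 1) (by omega) hm kv hkv
      (PySem.List.pyGetD L0 (((m + 1 : Nat) : Int) - 1) []) [] P nr hP hnr
    set rB := (PySem.List.pyGetD L0 (((m + 1 : Nat) : Int) - 1) []).foldl
      (pvMOpStep (((m + 1 : Nat) : Int) - 1)) (nr, [], P) with hrB
    have hstepA : pvStepA (L0.take (m + 1) ++ pvAsm ((m + 1 : Nat) : Int) kv P, nr)
        (((m + 1 : Nat) : Int) - 1) =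
        (L0.take m ++ pvAsm ((m : Nat) : Int) (kv ++ [rB.2.1]) rB.2.2, rB.1) := by
      unfold pvStepA
      rw [hget]
      rw [hEq]
      have hclose := pvAsm_close L0 (m + 1) (by omega) hm kv rB.2.2 rB.2.1 hkv
        (fun p hp => (hPb p hp).1)
      have e2 : ((m + 1 : Nat) : Int) - 1 = ((m : Nat) : Int) := by omega
      have e3 : (m + 1 : Nat) - 1 = m := by omega
      rw [e3] at hclose
      rw [e2] at hclose ⊢
      simp only []
      rw [hclose]
    have hstepB : pvMStep L0 (nr, kv, P) (((m + 1 : Nat) : Int) - 1) =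
        (rB.1, kv ++ [rB.2.1], rB.2.2) := by
      unfold pvMStep
      rfl
    rw [hstepA, hstepB]
    exact ih (by omega) (kv ++ [rB.2.1]) rB.2.2 rB.1 (by simp; omega)
      (fun p hp => ⟨by have := (hPb p hp).1; omega, (hPb p hp).2⟩) hNb

lemma pvGetD_oob {α : Type} (xs : List α) (i : Int) (d : α) (h : (xs.length : Int) ≤ i) :
    PySem.List.pyGetD xs i d = d := by
  unfold PySem.List.pyGetD PySem.List.pyGet? PySem.List.pyIdx?
  split_ifs with h1 h2 <;> simp_all <;> omega
lemma pvGetD_snoc {α : Type} (xs : List α) (x : α) (i : Int) (d : α) (h0 : 0 ≤ i) :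
    PySem.List.pyGetD (xs ++ [x]) i d =
      if i = (xs.length : Int) then x else PySem.List.pyGetD xs i d := by
  by_cases hi : i < (xs.length : Int)
  · rw [if_neg (by omega)]
    rw [PySem.List.pyGetD_eq_getElem _ _ h0 (by simp; omega),
        PySem.List.pyGetD_eq_getElem _ _ h0 hi]
    rw [List.getElem_append_left (by omega)]
  · by_cases he : i = (xs.length : Int)
    · rw [if_pos he]
      rw [PySem.List.pyGetD_eq_getElem _ _ h0 (by simp; omega)]
      rw [List.getElem_append_right (by omega)]
      simp [he]
    · rw [if_neg he, pvGetD_oob _ _ _ (by simp; omega), pvGetD_oob _ _ _ (by omega)]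
lemma pvGetD_insert_fold (l : List Int) (v : Int) (d : PySem.Dict Int Int) (t : Int) :
    (l.foldl (fun d t => d.insert t v) d).getD t 0 = if t ∈ l then v else d.getD t 0 := by
  induction l generalizing d with
  | nil => simp
  | cons x xs ih =>
    simp only [List.foldl_cons, ih, PySem.Dict.getD_insert, List.mem_cons]
    by_cases h1 : t ∈ xs <;> by_cases h2 : t = x <;> simp [h1, h2]
lemma pvMaxD_mem (l : List Int) (d : Int) (h : l ≠ []) :
    PySem.List.maxD l (fun x => x) d ∈ l := by
  cases hh : PySem.List.max? l (fun x => x) with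
  | none => exact absurd ((PySem.List.max?_eq_none_iff l _).mp hh) h
  | some m =>
    have : PySem.List.maxD l (fun x => x) d = m := by
      unfold PySem.List.maxD
      rw [hh]
      rfl
    rw [this]
    exact PySem.List.max?_mem hh
lemma pvMaxD_bounds (l : List Int) (d lo hi : Int) (hl : ∀ x ∈ l, lo ≤ x ∧ x ≤ hi)
    (h1 : lo ≤ d) (h2 : d ≤ hi) :
    lo ≤ PySem.List.maxD l (fun x => x) d ∧ PySem.List.maxD l (fun x => x) d ≤ hi := by
  rcases eq_or_ne l [] with rfl | h
  · constructor <;> simpa [PySem.List.maxD, PySem.List.max?]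
  · exact hl _ (pvMaxD_mem l d h)
lemma pvMaxD_range (m : Nat) :
    PySem.List.maxD ((List.range m).map (fun (k : Nat) => (k : Int))) (fun x => x) (-1) = (m : Int) - 1 := by
  rcases Nat.eq_zero_or_pos m with rfl | hm
  · simp [PySem.List.maxD, PySem.List.max?]
  · have hlen : ((List.range m).map (fun (k : Nat) => (k : Int))).length = m := by simp
    have hne : ((List.range m).map (fun (k : Nat) => (k : Int))) ≠ [] :=
      List.ne_nil_of_length_pos (by omega)
    cases hh : PySem.List.max? ((List.range m).map (fun (k : Nat) => (k : Int))) (fun x => x) with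
    | none => exact absurd ((PySem.List.max?_eq_none_iff _ _).mp hh) hne
    | some mm =>
      have hval : PySem.List.maxD ((List.range m).map (fun (k : Nat) => (k : Int))) (fun x => x) (-1) = mm := by
        unfold PySem.List.maxD
        rw [hh]
        rfl
      have hmem := PySem.List.max?_mem hh
      have hmax := PySem.List.max?_isMax hh
      have h1 : ((m : Int) - 1) ≤ mm := by
        refine hmax _ ?_
        refine List.mem_map.mpr ⟨m - 1, List.mem_range.mpr (by omega), by omega⟩
      have h2 : mm ≤ (m : Int) - 1 := by
        obtain ⟨k, hk, he⟩ := List.mem_map.mp hmem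
        have := List.mem_range.mp hk
        omega
      omega

-- getD of a key outside keys is the default
lemma pvGetD_not_mem_keys {ν : Type} (d : PySem.Dict Int ν) (k : Int) (d0 : ν)
    (h : k ∉ d.keys) : d.getD k d0 = d0 := by
  have hc : d.contains k = false := by
    cases hc : d.contains k
    · rfl
    · exact absurd ((PySem.Dict.contains_iff_mem_keys d k).mp hc) h
  have := (PySem.Dict.get?_eq_none_iff_contains d k).mpr hc
  simp [PySem.Dict.getD, this]

lemma pvGetD_setD {α : Type} (xs : List α) (j i : Int) (v d : α) (h0 : 0 ≤ j)
    (hj : j < (xs.length : Int)) (hi : 0 ≤ i) :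
    PySem.List.pyGetD (PySem.List.pySetD xs j v) i d = if i = j then v else PySem.List.pyGetD xs i d := by
  have e1 : j = ((j.toNat : Nat) : Int) := by omega
  have e2 : i = ((i.toNat : Nat) : Int) := by omega
  rw [e1, e2, PySem.List.pyGetD_pySetD_natCast _ _ _ _ _ (by omega)]
  by_cases h : i.toNat = j.toNat
  · rw [if_pos h, if_pos (by omega)]
  · rw [if_neg h, if_neg (by omega), ← e2]

-- the pass-1 invariant: A's (next_free, defaultdict) state matches B's (next_free, dense list) state
lemma pvPass1_agree_aux :
    ∀ (ops : List (String × List Int)) (dA : PySem.Dict Int Int)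
      (DD : PySem.Dict Int (List (String × List Int))) (dB : PySem.Dict Int Int)
      (Lb : List (List (String × List Int))),
      (∀ t, dA.getD t 0 = dB.getD t 0) →
      (∀ i : Int, 0 ≤ i → DD.getD i [] = PySem.List.pyGetD Lb i []) →
      DD.keys = (List.range Lb.length).map (fun (k : Nat) => (k : Int)) →
      (∀ t, 0 ≤ dB.getD t 0 ∧ dB.getD t 0 ≤ (Lb.length : Int)) →
      (∀ t, (ops.foldl
          (fun (st : PySem.Dict Int Int × PySem.Dict Int (List (String × List Int))) op =>
            let last := PySem.List.maxD (op.2.map (fun t => st.1.getD t 0)) (fun x => x) 0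
            (op.2.foldl (fun d t => d.insert t (last + 1)) st.1,
             st.2.modify last [] (· ++ [op]))) (dA, DD)).1.getD t 0 =
        (ops.foldl pvPass1Step (dB, Lb)).1.getD t 0) ∧
      (∀ i : Int, 0 ≤ i → (ops.foldl
          (fun (st : PySem.Dict Int Int × PySem.Dict Int (List (String × List Int))) op =>
            let last := PySem.List.maxD (op.2.map (fun t => st.1.getD t 0)) (fun x => x) 0
            (op.2.foldl (fun d t => d.insert t (last + 1)) st.1,
             st.2.modify last [] (· ++ [op]))) (dA, DD)).2.getD i [] =
        PySem.List.pyGetD ((ops.foldl pvPass1Step (dB, Lb)).2) i []) ∧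
      (ops.foldl
          (fun (st : PySem.Dict Int Int × PySem.Dict Int (List (String × List Int))) op =>
            let last := PySem.List.maxD (op.2.map (fun t => st.1.getD t 0)) (fun x => x) 0
            (op.2.foldl (fun d t => d.insert t (last + 1)) st.1,
             st.2.modify last [] (· ++ [op]))) (dA, DD)).2.keys =
        (List.range ((ops.foldl pvPass1Step (dB, Lb)).2).length).map (fun (k : Nat) => (k : Int)) := by
  intro ops
  induction ops with
  | nil =>
    intro dA DD dB Lb h1 h2 h3 h4
    exact ⟨h1, h2, by simpa using h3⟩
  | cons op ops ih =>
    intro dA DD dB Lb h1 h2 h3 h4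
    simp only [List.foldl_cons]
    -- the two computed layers agree
    have hmapeq : op.2.map (fun t => dA.getD t 0) = op.2.map (fun t => dB.getD t 0) :=
      List.map_congr_left (fun t _ => h1 t)
    set Lv := PySem.List.maxD (op.2.map (fun t => dB.getD t 0)) (fun x => x) 0 with hLv
    have hLA : PySem.List.maxD (op.2.map (fun t => dA.getD t 0)) (fun x => x) 0 = Lv := by
      rw [hmapeq]
    have hb : 0 ≤ Lv ∧ Lv ≤ (Lb.length : Int) := by
      refine pvMaxD_bounds _ _ _ _ ?_ le_rfl (by positivity)
      intro x hx
      obtain ⟨t, _, rfl⟩ := List.mem_map.mp hx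
      exact h4 t
    -- names for the new states
    set Lb1 := if Lv == (Lb.length : Int) then Lb ++ [[]] else Lb with hLb1
    have hLb1len : Lb1.length = if Lv = (Lb.length : Int) then Lb.length + 1 else Lb.length := by
      rw [hLb1]
      by_cases h : Lv = (Lb.length : Int) <;> simp [h]
    have hLvlt : Lv < (Lb1.length : Int) := by
      rw [hLb1len]
      by_cases h : Lv = (Lb.length : Int) <;> simp [h] <;> omega
    have hstepB : pvPass1Step (dB, Lb) op =
        (op.2.foldl (fun d t => d.insert t (Lv + 1)) dB,
         PySem.List.pySetD Lb1 Lv (PySem.List.pyGetD Lb1 Lv [] ++ [op])) := rfl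
    have hLbget : PySem.List.pyGetD Lb1 Lv [] = DD.getD Lv [] := by
      rw [hLb1]
      by_cases h : Lv = (Lb.length : Int)
      · rw [if_pos (by simpa using h)]
        rw [pvGetD_snoc _ _ _ _ hb.1, if_pos h]
        refine (pvGetD_not_mem_keys DD Lv [] ?_).symm
        rw [h3, h]
        intro hmem
        obtain ⟨k, hk, he⟩ := List.mem_map.mp hmem
        have := List.mem_range.mp hk
        omega
      · rw [if_neg (by simpa using h)]
        exact (h2 Lv hb.1).symm
    -- the modified defaultdict matches the updated dense list, pointwise
    have hget' : ∀ i : Int, 0 ≤ i →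
        (DD.modify Lv [] (· ++ [op])).getD i [] =
          PySem.List.pyGetD (PySem.List.pySetD Lb1 Lv (PySem.List.pyGetD Lb1 Lv [] ++ [op])) i [] := by
      intro i hi
      rw [PySem.Dict.getD_modify]
      rw [pvGetD_setD _ _ _ _ _ hb.1 hLvlt hi]
      by_cases h : i = Lv
      · rw [if_pos h, if_pos h, hLbget]
      · rw [if_neg h, if_neg h]
        rw [hLb1]
        by_cases hc : Lv = (Lb.length : Int)
        · rw [if_pos (by simpa using hc)]
          rw [pvGetD_snoc _ _ _ _ hi, if_neg (by omega)]
          exact h2 i hi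
        · rw [if_neg (by simpa using hc)]
          exact h2 i hi
    -- keys stay the range of the (possibly grown) length
    have hkeys' : (DD.modify Lv [] (· ++ [op])).keys =
        (List.range (PySem.List.pySetD Lb1 Lv (PySem.List.pyGetD Lb1 Lv [] ++ [op])).length).map
          (fun (k : Nat) => (k : Int)) := by
      rw [PySem.List.length_pySetD]
      rw [PySem.Dict.keys_modify]
      by_cases h : Lv = (Lb.length : Int)
      · have hnc : DD.contains Lv = false := by
          cases hc : DD.contains Lv
          · rfl
          · exfalso
            have := (PySem.Dict.contains_iff_mem_keys DD Lv).mp hc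
            rw [h3, h] at this
            obtain ⟨k, hk, he⟩ := List.mem_map.mp this
            have := List.mem_range.mp hk
            omega
        rw [PySem.Dict.keys_insert_of_not_contains _ _ hnc, h3]
        rw [hLb1len, if_pos h, List.range_succ, List.map_append, h]
        rfl
      · have hlt : Lv < (Lb.length : Int) := by omega
        have hc : DD.contains Lv = true := by
          refine (PySem.Dict.contains_iff_mem_keys DD Lv).mpr ?_
          rw [h3]
          exact List.mem_map.mpr ⟨Lv.toNat, List.mem_range.mpr (by omega), by omega⟩
        rw [PySem.Dict.keys_insert_of_contains _ _ hc, h3, hLb1len, if_neg h]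
    -- bounds for the new next_free
    have hbounds' : ∀ t, 0 ≤ (op.2.foldl (fun d t => d.insert t (Lv + 1)) dB).getD t 0 ∧
        (op.2.foldl (fun d t => d.insert t (Lv + 1)) dB).getD t 0 ≤
          ((PySem.List.pySetD Lb1 Lv (PySem.List.pyGetD Lb1 Lv [] ++ [op])).length : Int) := by
      intro t
      rw [PySem.List.length_pySetD, pvGetD_insert_fold]
      have hlen' : (Lb.length : Int) ≤ (Lb1.length : Int) := by
        rw [hLb1len]
        by_cases h : Lv = (Lb.length : Int) <;> simp [h] <;> omega
      by_cases h : t ∈ op.2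
      · rw [if_pos h]
        constructor
        · omega
        · rw [hLb1len]
          by_cases hc : Lv = (Lb.length : Int)
          · rw [if_pos hc]; omega
          · rw [if_neg hc]; omega
      · rw [if_neg h]
        have := h4 t
        omega
    have hnf' : ∀ t, (op.2.foldl (fun d t => d.insert t (Lv + 1)) dA).getD t 0 =
        (op.2.foldl (fun d t => d.insert t (Lv + 1)) dB).getD t 0 := by
      intro t
      rw [pvGetD_insert_fold, pvGetD_insert_fold, h1 t]
    have := ih (op.2.foldl (fun d t => d.insert t (Lv + 1)) dA) (DD.modify Lv [] (· ++ [op]))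
      (op.2.foldl (fun d t => d.insert t (Lv + 1)) dB)
      (PySem.List.pySetD Lb1 Lv (PySem.List.pyGetD Lb1 Lv [] ++ [op]))
      hnf' hget' hkeys' hbounds'
    simpa [hstepB, hLA] using this

lemma pvPass1_eq (ops : List (String × List Int)) (q : Int) :
    pvPass1 ops q = pvAsap ops q := by
  unfold pvPass1 pvAsap
  simp only []
  obtain ⟨k1, k2, k3⟩ := pvPass1_agree_aux ops
    ((PySem.List.pyRange 0 q 1).foldl (fun d qq => d.insert qq 0) PySem.Dict.empty)
    PySem.Dict.empty
    ((PySem.List.pyRange 0 q 1).foldl (fun d qq => d.insert qq 0) PySem.Dict.empty) []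
    (fun t => rfl)
    (by
      intro i hi
      rw [PySem.Dict.getD_empty, pvGetD_oob _ _ _ (by simp; omega)])
    (by simp [PySem.Dict.keys, PySem.Dict.empty])
    (by
      intro t
      rw [pvGetD_insert_fold]
      by_cases h : t ∈ PySem.List.pyRange 0 q 1 <;> simp [h, PySem.Dict.getD_empty])
  set DA := (ops.foldl
      (fun (st : PySem.Dict Int Int × PySem.Dict Int (List (String × List Int))) op =>
        let last := PySem.List.maxD (op.2.map (fun t => st.1.getD t 0)) (fun x => x) 0
        (op.2.foldl (fun d t => d.insert t (last + 1)) st.1,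
         st.2.modify last [] (· ++ [op])))
      ((PySem.List.pyRange 0 q 1).foldl (fun d qq => d.insert qq 0) PySem.Dict.empty,
       PySem.Dict.empty)) with hDA
  set LB := (ops.foldl pvPass1Step
    ((PySem.List.pyRange 0 q 1).foldl (fun d qq => d.insert qq 0) PySem.Dict.empty,
     ([] : List (List (String × List Int))))).2 with hLB
  have hmax : PySem.List.maxD DA.2.keys (fun x => x) (-1) = (LB.length : Int) - 1 := by
    rw [k3]
    exact pvMaxD_range LB.length
  rw [hmax]
  have hr : (LB.length : Int) - 1 + 1 = ((LB.length : Nat) : Int) := by omega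
  rw [hr, PySem.List.pyRange_zero_natCast]
  apply List.ext_getElem
  · simp
  · intro k hk1 hk2
    simp only [List.getElem_map, List.getElem_range]
    rw [k2 _ (by positivity)]
    rw [PySem.List.pyGetD_eq_getElem _ _ (by positivity) (by simp at hk1 ⊢; omega)]
    simp

lemma pvMaxD_isMax (l : List Int) (d : Int) (x : Int) (hx : x ∈ l) :
    x ≤ PySem.List.maxD l (fun y => y) d := by
  cases hh : PySem.List.max? l (fun y => y) with
  | none =>
    rw [(PySem.List.max?_eq_none_iff l _).mp hh] at hx
    cases hx
  | some m =>
    have : PySem.List.maxD l (fun y => y) d = m := by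
      unfold PySem.List.maxD
      rw [hh]
      rfl
    rw [this]
    exact PySem.List.max?_isMax hh x hx

def pvDisj (a b : String × List Int) : Prop := ∀ t, t ∈ a.2 → t ∉ b.2

lemma pvPass1_inv (S : List (String × List Int)) :
    ∀ (ops : List (String × List Int)) (dB : PySem.Dict Int Int)
      (Lb : List (List (String × List Int))),
      (∀ op ∈ ops, op ∈ S) →
      (∀ i : Int, 0 ≤ i → ∀ op ∈ PySem.List.pyGetD Lb i [], op ∈ S) →
      (∀ i : Int, 0 ≤ i → ∀ op ∈ PySem.List.pyGetD Lb i [], ∀ t ∈ op.2, i < dB.getD t 0) →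
      (∀ t, 0 ≤ dB.getD t 0 ∧ dB.getD t 0 ≤ (Lb.length : Int)) →
      (∀ i : Int, 0 ≤ i → (PySem.List.pyGetD Lb i []).Pairwise pvDisj) →
      (∀ i : Int, 0 ≤ i →
        ∀ op ∈ PySem.List.pyGetD ((ops.foldl pvPass1Step (dB, Lb)).2) i [], op ∈ S) ∧
      (∀ i : Int, 0 ≤ i →
        (PySem.List.pyGetD ((ops.foldl pvPass1Step (dB, Lb)).2) i []).Pairwise pvDisj) := by
  intro ops
  induction ops with
  | nil =>
    intro dB Lb _ hS hJ hB hD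
    exact ⟨hS, hD⟩
  | cons op ops ih =>
    intro dB Lb hops hS hJ hB hD
    simp only [List.foldl_cons]
    -- one step
    set Lv := PySem.List.maxD (op.2.map (fun t => dB.getD t 0)) (fun x => x) 0 with hLv
    have hb : 0 ≤ Lv ∧ Lv ≤ (Lb.length : Int) := by
      refine pvMaxD_bounds _ _ _ _ ?_ le_rfl (by positivity)
      intro x hx
      obtain ⟨t, _, rfl⟩ := List.mem_map.mp hx
      exact hB t
    have hle : ∀ t ∈ op.2, dB.getD t 0 ≤ Lv :=
      fun t ht => pvMaxD_isMax _ _ _ (List.mem_map.mpr ⟨t, ht, rfl⟩)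
    set Lb1 := if Lv == (Lb.length : Int) then Lb ++ [[]] else Lb with hLb1
    have hLb1len : Lb1.length = if Lv = (Lb.length : Int) then Lb.length + 1 else Lb.length := by
      rw [hLb1]
      by_cases h : Lv = (Lb.length : Int) <;> simp [h]
    have hLvlt : Lv < (Lb1.length : Int) := by
      rw [hLb1len]
      by_cases h : Lv = (Lb.length : Int) <;> simp [h] <;> omega
    have hLb1get : ∀ i : Int, 0 ≤ i → PySem.List.pyGetD Lb1 i [] = PySem.List.pyGetD Lb i [] := by
      intro i hi
      rw [hLb1]
      by_cases h : Lv = (Lb.length : Int)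
      · rw [if_pos (by simpa using h)]
        rw [pvGetD_snoc _ _ _ _ hi]
        by_cases he : i = (Lb.length : Int)
        · rw [if_pos he, pvGetD_oob _ _ _ (by omega)]
        · rw [if_neg he]
      · rw [if_neg (by simpa using h)]
    have hstep : pvPass1Step (dB, Lb) op =
        (op.2.foldl (fun d t => d.insert t (Lv + 1)) dB,
         PySem.List.pySetD Lb1 Lv (PySem.List.pyGetD Lb1 Lv [] ++ [op])) := rfl
    rw [hstep]
    set dB' := op.2.foldl (fun d t => d.insert t (Lv + 1)) dB with hdB'
    set Lb' := PySem.List.pySetD Lb1 Lv (PySem.List.pyGetD Lb1 Lv [] ++ [op]) with hLb'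
    have hget' : ∀ i : Int, 0 ≤ i → PySem.List.pyGetD Lb' i [] =
        if i = Lv then PySem.List.pyGetD Lb Lv [] ++ [op] else PySem.List.pyGetD Lb i [] := by
      intro i hi
      rw [hLb', pvGetD_setD _ _ _ _ _ hb.1 hLvlt hi, hLb1get Lv hb.1, hLb1get i hi]
    have hdget : ∀ t, dB'.getD t 0 = if t ∈ op.2 then Lv + 1 else dB.getD t 0 := by
      intro t
      rw [hdB', pvGetD_insert_fold]
    have hlen' : (Lb'.length : Int) = if Lv = (Lb.length : Int) then (Lb.length : Int) + 1 else (Lb.length : Int) := by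
      rw [hLb', PySem.List.length_pySetD, hLb1len]
      by_cases h : Lv = (Lb.length : Int) <;> simp [h]
    refine ih dB' Lb' ?_ ?_ ?_ ?_ ?_
    · intro op' hop'
      exact hops op' (List.mem_cons_of_mem _ hop')
    · intro i hi op' hop'
      rw [hget' i hi] at hop'
      by_cases h : i = Lv
      · rw [if_pos h] at hop'
        rcases List.mem_append.mp hop' with h' | h'
        · exact hS Lv hb.1 op' h'
        · simp only [List.mem_singleton] at h'
          subst h'
          exact hops op' List.mem_cons_self
      · rw [if_neg h] at hop'
        exact hS i hi op' hop'
    · intro i hi op' hop' t ht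
      rw [hget' i hi] at hop'
      rw [hdget t]
      by_cases h : i = Lv
      · rw [if_pos h] at hop'
        rcases List.mem_append.mp hop' with h' | h'
        · have := hJ Lv hb.1 op' h' t ht
          by_cases hm : t ∈ op.2
          · rw [if_pos hm]; omega
          · rw [if_neg hm]; omega
        · simp only [List.mem_singleton] at h'
          subst h'
          rw [if_pos ht]
          omega
      · rw [if_neg h] at hop'
        have := hJ i hi op' hop' t ht
        by_cases hm : t ∈ op.2
        · rw [if_pos hm]
          have := hle t hm
          omega
        · rw [if_neg hm]
          exact this
    · intro t
      rw [hdget t]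
      by_cases hm : t ∈ op.2
      · rw [if_pos hm]
        rw [hlen']
        by_cases h : Lv = (Lb.length : Int) <;> [rw [if_pos h] ; rw [if_neg h]] <;> omega
      · rw [if_neg hm]
        have := hB t
        have : (Lb.length : Int) ≤ (Lb'.length : Int) := by
          rw [hlen']
          by_cases h : Lv = (Lb.length : Int) <;> [rw [if_pos h] ; rw [if_neg h]] <;> omega
        have := hB t
        omega
    · intro i hi
      rw [hget' i hi]
      by_cases h : i = Lv
      · rw [if_pos h]
        rw [List.pairwise_append]
        refine ⟨hD Lv hb.1, List.pairwise_singleton _ _, ?_⟩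
        intro op' hop' op'' hop''
        simp only [List.mem_singleton] at hop''
        subst hop''
        intro t ht hmem
        have := hJ Lv hb.1 op' hop' t ht
        have := hle t hmem
        omega
      · rw [if_neg h]
        exact hD i hi

def pvUsedAt (lay : List (String × List Int)) (t : Int) : Bool :=
  lay.any (fun op => !pvIsReset op.1 && op.2.contains t)

def pvPairs (L : List (List (String × List Int))) : List (Int × Int) :=
  (PySem.List.enumerate L).flatMap
    (fun p => p.2.flatMap
      (fun op => if pvIsReset op.1 then [] else op.2.map (fun t => (t, p.1))))

lemma pvUses_fold_eq (L : List (List (String × List Int))) :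
    pvUses L = (pvPairs L).foldl (fun u q => u.modify q.1 [] (· ++ [q.2])) PySem.Dict.empty := by
  unfold pvUses pvPairs
  rw [List.foldl_flatMap]
  refine PySem.List.foldl_congr_mem _ _ _ _ ?_
  intro u p _
  rw [List.foldl_flatMap]
  refine PySem.List.foldl_congr_mem _ _ _ _ ?_
  intro u' op _
  unfold pvUsesOp
  by_cases h : pvIsReset op.1
  · rw [if_pos h, if_pos h]
    rfl
  · rw [if_neg h, if_neg h, List.foldl_map]

lemma pvUses_eq (L : List (List (String × List Int))) (t : Int) :
    (pvUses L).getD t [] = ((pvPairs L).filter (fun q => q.1 == t)).map (·.2) := by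
  rw [pvUses_fold_eq, PySem.Dict.getD_foldl_modify_append]
  simp [PySem.Dict.getD_empty]

lemma pvPairs_snd (L : List (List (String × List Int))) (p : Int × List (String × List Int))
    (x : Int × Int)
    (hx : x ∈ p.2.flatMap (fun op => if pvIsReset op.1 then [] else op.2.map (fun t => (t, p.1)))) :
    x.2 = p.1 := by
  obtain ⟨op, _, hx⟩ := List.mem_flatMap.mp hx
  by_cases h : pvIsReset op.1
  · rw [if_pos h] at hx
    cases hx
  · rw [if_neg h] at hx
    obtain ⟨t, _, rfl⟩ := List.mem_map.mp hx
    rfl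

lemma pvUses_chain (L : List (List (String × List Int))) (t : Int) :
    ((pvUses L).getD t []).Pairwise (· ≤ ·) := by
  rw [pvUses_eq]
  rw [List.pairwise_map]
  refine List.Pairwise.sublist List.filter_sublist ?_
  unfold pvPairs
  rw [List.flatMap_def, List.pairwise_flatten]
  constructor
  · intro l hl
    obtain ⟨p, _, rfl⟩ := List.mem_map.mp hl
    refine List.pairwise_of_forall_mem_list ?_
    intro a ha b hb
    exact le_of_eq (by rw [pvPairs_snd L p a ha, pvPairs_snd L p b hb])
  · rw [List.pairwise_map]
    refine (PySem.List.pairwise_lt_enumerate L 0).imp_of_mem ?_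
    intro p q hp hq hlt x hx y hy
    rw [pvPairs_snd L p x hx, pvPairs_snd L q y hy]
    omega

lemma pvUses_mem (L : List (List (String × List Int))) (t j : Int) :
    j ∈ (pvUses L).getD t [] ↔
      0 ≤ j ∧ j < (L.length : Int) ∧ pvUsedAt (PySem.List.pyGetD L j []) t := by
  rw [pvUses_eq]
  constructor
  · intro h
    obtain ⟨q, hq, rfl⟩ := List.mem_map.mp h
    have hq1 := List.mem_filter.mp hq
    have hqt : q.1 = t := by simpa using hq1.2
    obtain ⟨p, hp, hx⟩ := List.mem_flatMap.mp hq1.1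
    obtain ⟨k, hk, rfl⟩ := (PySem.List.mem_enumerate_iff L 0 p).mp hp
    have hsnd := pvPairs_snd L _ _ hx
    simp only [] at hsnd
    obtain ⟨op, hop, hx2⟩ := List.mem_flatMap.mp hx
    by_cases hr : pvIsReset op.1
    · rw [if_pos hr] at hx2
      cases hx2
    · rw [if_neg hr] at hx2
      obtain ⟨tt, htt, he⟩ := List.mem_map.mp hx2
      have ht1 : tt = t := by
        have := congrArg Prod.fst he
        simp at this
        omega
      refine ⟨by omega, by simp at hsnd; omega, ?_⟩
      have hget : PySem.List.pyGetD L q.2 [] = L[k] := by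
        rw [show q.2 = ((k : Nat) : Int) from by simp at hsnd; omega]
        rw [PySem.List.pyGetD_eq_getElem _ _ (by positivity) (by simp; omega)]
        simp
      rw [hget]
      unfold pvUsedAt
      refine List.any_eq_true.mpr ⟨op, hop, ?_⟩
      simp [hr]
      rw [← ht1]
      exact htt
  · rintro ⟨h0, hlen, hused⟩
    refine List.mem_map.mpr ⟨(t, j), List.mem_filter.mpr ⟨?_, by simp⟩, rfl⟩
    unfold pvPairs
    refine List.mem_flatMap.mpr ⟨(j, PySem.List.pyGetD L j []), ?_, ?_⟩
    · refine (PySem.List.mem_enumerate_iff L 0 _).mpr ⟨j.toNat, by omega, ?_⟩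
      rw [PySem.List.pyGetD_eq_getElem _ _ h0 hlen]
      simp
      omega
    · obtain ⟨op, hop, hcond⟩ := List.any_eq_true.mp hused
      refine List.mem_flatMap.mpr ⟨op, hop, ?_⟩
      have hr : pvIsReset op.1 = false := by
        cases h : pvIsReset op.1
        · rfl
        · simp [h] at hcond
      rw [if_neg (by simp [hr])]
      refine List.mem_map.mpr ⟨t, ?_, rfl⟩
      simp [hr] at hcond
      exact hcond

lemma pvFA_top (us : List Int) (i n : Int) (h : ∀ j ∈ us, j ≤ i) :
    pvFirstAfter us i n = n := by
  induction us with
  | nil => rfl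
  | cons j rest ih =>
    unfold pvFirstAfter
    rw [if_neg (by have := h j List.mem_cons_self; omega)]
    exact ih (fun j' hj' => h j' (List.mem_cons_of_mem _ hj'))

lemma pvFA_cons (j : Int) (rest : List Int) (i n : Int) :
    pvFirstAfter (j :: rest) i n = if j > i then j else pvFirstAfter rest i n := rfl

lemma pvFA_step (us : List Int) (i n : Int) (hs : us.Pairwise (· ≤ ·)) :
    pvFirstAfter us (i - 1) n = if i ∈ us then i else pvFirstAfter us i n := by
  induction us with
  | nil => simp [pvFirstAfter]
  | cons j rest ih =>
    have hp := List.pairwise_cons.mp hs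
    by_cases h1 : j > i
    · have hni : i ∉ (j :: rest) := by
        intro hmem
        rcases List.mem_cons.mp hmem with h | h
        · omega
        · have := hp.1 i h
          omega
      rw [if_neg hni, pvFA_cons, pvFA_cons, if_pos (by omega : j > i - 1), if_pos h1]
    · by_cases h2 : j = i
      · rw [if_pos (by simp [h2]), pvFA_cons, if_pos (by omega : j > i - 1)]
        omega
      · have hji : j < i := by omega
        have hmm : (i ∈ (j :: rest)) ↔ (i ∈ rest) := by
          simp [List.mem_cons]
          omega
        rw [pvFA_cons, if_neg (by omega : ¬ j > i - 1), ih hp.2]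
        by_cases hm : i ∈ rest
        · rw [if_pos hm, if_pos (hmm.mpr hm)]
        · rw [if_neg hm, if_neg (by rw [hmm]; exact hm), pvFA_cons, if_neg (by omega : ¬ j > i)]

-- snapshot step: pushing the "next required" boundary one layer down
lemma pvSnap_step (L : List (List (String × List Int))) (t i : Int)
    (h0 : 0 ≤ i) (hlen : i < (L.length : Int)) :
    pvFirstAfter ((pvUses L).getD t []) (i - 1) (L.length : Int) =
      if pvUsedAt (PySem.List.pyGetD L i []) t then i
      else pvFirstAfter ((pvUses L).getD t []) i (L.length : Int) := by
  rw [pvFA_step _ _ _ (pvUses_chain L t)]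
  have : i ∈ (pvUses L).getD t [] ↔ pvUsedAt (PySem.List.pyGetD L i []) t = true := by
    rw [pvUses_mem]
    constructor
    · rintro ⟨_, _, h⟩
      exact h
    · intro h
      exact ⟨h0, hlen, h⟩
  by_cases h : pvUsedAt (PySem.List.pyGetD L i []) t
  · rw [if_pos (this.mpr h), if_pos h]
  · rw [if_neg (fun hm => h (this.mp hm)), if_neg h]

-- snapshot start: beyond the last layer nothing is required
lemma pvSnap_init (L : List (List (String × List Int))) (t : Int) :
    pvFirstAfter ((pvUses L).getD t []) ((L.length : Int) - 1) (L.length : Int) = (L.length : Int) := by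
  refine pvFA_top _ _ _ ?_
  intro j hj
  have := (pvUses_mem L t j).mp hj
  omega

def pvUpd (lay : List (String × List Int)) (i : Int) (nr : PySem.Dict Int Int) :
    PySem.Dict Int Int :=
  lay.foldl (fun d op => if pvIsReset op.1 then d else op.2.foldl (fun d t => d.insert t i) d) nr

lemma pvUpd_getD (lay : List (String × List Int)) (i : Int) (nr : PySem.Dict Int Int) (t : Int) :
    (pvUpd lay i nr).getD t 0 = if pvUsedAt lay t then i else nr.getD t 0 := by
  induction lay generalizing nr with
  | nil => simp [pvUpd, pvUsedAt]
  | cons op rest ih =>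
    unfold pvUpd at ih ⊢
    rw [List.foldl_cons]
    rw [ih]
    have hU : pvUsedAt (op :: rest) t =
        ((!pvIsReset op.1 && op.2.contains t) || pvUsedAt rest t) := by
      unfold pvUsedAt
      rw [List.any_cons]
    rw [hU]
    by_cases hr : pvIsReset op.1
    · have hrB : pvIsReset op.1 = true := hr
      rw [if_pos hr]
      simp [hrB]
    · have hrB : pvIsReset op.1 = false := by
        cases h : pvIsReset op.1
        · rfl
        · exact absurd h (by simpa [pvIsReset] using hr)
      rw [if_neg hr]
      rw [pvGetD_insert_fold]
      by_cases hu : pvUsedAt rest t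
      · simp [hu]
      · by_cases hm : t ∈ op.2
        · simp [hu, hrB, hm, List.contains_iff_mem]
        · simp [hu, hrB, hm, List.contains_iff_mem]

-- folds whose state is a pair of output lists commute with seeding those lists
lemma pvFoldl_biappend {α β γ : Type} (step : (List α × List β) → γ → (List α × List β))
    (h : ∀ s x, step s x = (s.1 ++ (step ([], []) x).1, s.2 ++ (step ([], []) x).2)) :
    ∀ (l : List γ) (a : List α) (b : List β),
      l.foldl step (a, b) = (a ++ (l.foldl step ([], [])).1, b ++ (l.foldl step ([], [])).2) := by
  intro l
  induction l with
  | nil => simp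
  | cons x xs ih =>
    intro a b
    rw [List.foldl_cons, List.foldl_cons, h (a, b) x]
    rw [ih _ _]
    conv_rhs => rw [ih (step ([], []) x).1 (step ([], []) x).2]
    simp [List.append_assoc]

lemma pvClsR_append (U : PySem.Dict Int (List Int)) (n i : Int) (name : String) :
    ∀ s x, pvClassifyReset U n i name s x =
      (s.1 ++ (pvClassifyReset U n i name ([], []) x).1,
       s.2 ++ (pvClassifyReset U n i name ([], []) x).2) := by
  intro s x
  unfold pvClassifyReset
  by_cases h : pvFirstAfter (U.getD x []) i n - 1 > i <;> simp [h]

lemma pvClsOp_append (U : PySem.Dict Int (List Int)) (n i : Int) :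
    ∀ s op, pvClassifyOp U n i s op =
      (s.1 ++ (pvClassifyOp U n i ([], []) op).1,
       s.2 ++ (pvClassifyOp U n i ([], []) op).2) := by
  intro s op
  unfold pvClassifyOp
  by_cases h : pvIsReset op.1
  · rw [if_pos h, if_pos h]
    exact pvFoldl_biappend _ (pvClsR_append U n i op.1) op.2 s.1 s.2
  · rw [if_neg h, if_neg h]
    simp

lemma pvCls_offset (U : PySem.Dict Int (List Int)) (n i : Int)
    (lay : List (String × List Int)) (a : List (String × List Int))
    (b : List (Int × (String × List Int))) :
    lay.foldl (pvClassifyOp U n i) (a, b) =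
      (a ++ (lay.foldl (pvClassifyOp U n i) ([], [])).1,
       b ++ (lay.foldl (pvClassifyOp U n i) ([], [])).2) :=
  pvFoldl_biappend _ (pvClsOp_append U n i) lay a b

-- one reset op of the machine is a pure classification (next_required is read only)
lemma pvMReset_eq (U : PySem.Dict Int (List Int)) (n i : Int) (name : String) :
    ∀ (ts : List Int) (nr : PySem.Dict Int Int)
      (cp : List (String × List Int) × List (Int × (String × List Int))),
      (∀ t ∈ ts, nr.getD t 0 = pvFirstAfter (U.getD t []) i n) →
      ts.foldl (pvMResetStep i name) (nr, cp) =
        (nr, ts.foldl (pvClassifyReset U n i name) cp) := by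
  intro ts
  induction ts with
  | nil => intro nr cp _; rfl
  | cons t ts ih =>
    intro nr cp hH
    rw [List.foldl_cons, List.foldl_cons]
    have hval := hH t List.mem_cons_self
    have hstep : pvMResetStep i name (nr, cp) t =
        (nr, pvClassifyReset U n i name cp t) := by
      unfold pvMResetStep pvClassifyReset
      rw [show (nr, cp).1 = nr from rfl]
      rw [hval]
      by_cases h : pvFirstAfter (U.getD t []) i n - 1 > i <;> simp [h]
    rw [hstep]
    exact ih nr _ (fun t' ht' => hH t' (List.mem_cons_of_mem _ ht'))

-- a whole layer of the machine = pure next_required update + pure classification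
lemma pvMLayer (U : PySem.Dict Int (List Int)) (n i : Int) :
    ∀ (lay : List (String × List Int)) (nr : PySem.Dict Int Int)
      (cp : List (String × List Int) × List (Int × (String × List Int))),
      lay.Pairwise pvDisj →
      (∀ op ∈ lay, pvIsReset op.1 = true → ∀ t ∈ op.2,
        nr.getD t 0 = pvFirstAfter (U.getD t []) i n) →
      lay.foldl (pvMOpStep i) (nr, cp) =
        (pvUpd lay i nr, lay.foldl (pvClassifyOp U n i) cp) := by
  intro lay
  induction lay with
  | nil => intro nr cp _ _; rfl
  | cons op rest ih =>
    intro nr cp hD hH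
    have hDp := List.pairwise_cons.mp hD
    rw [List.foldl_cons, List.foldl_cons]
    by_cases hr : pvIsReset op.1
    · have hrB : pvIsReset op.1 = true := hr
      have hstep : pvMOpStep i (nr, cp) op =
          (nr, op.2.foldl (pvClassifyReset U n i op.1) cp) := by
        unfold pvMOpStep
        rw [if_pos hr]
        exact pvMReset_eq U n i op.1 op.2 nr cp
          (fun t ht => hH op List.mem_cons_self hr t ht)
      rw [hstep]
      have hcls : pvClassifyOp U n i cp op = op.2.foldl (pvClassifyReset U n i op.1) cp := by
        unfold pvClassifyOp
        rw [if_pos hrB]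
      rw [← hcls]
      have hupd : pvUpd (op :: rest) i nr = pvUpd rest i nr := by
        unfold pvUpd
        rw [List.foldl_cons, if_pos hr]
      rw [hupd]
      exact ih nr _ hDp.2 (fun op' hop' hro t ht => hH op' (List.mem_cons_of_mem _ hop') hro t ht)
    · have hrB : pvIsReset op.1 = false := by
        cases h : pvIsReset op.1
        · rfl
        · exact absurd h (by simpa [pvIsReset] using hr)
      have hstep : pvMOpStep i (nr, cp) op =
          (op.2.foldl (fun d t => d.insert t i) nr, cp.1 ++ [op], cp.2) := by
        unfold pvMOpStep
        rw [if_neg hr]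
      have hcls : pvClassifyOp U n i cp op = (cp.1 ++ [op], cp.2) := by
        unfold pvClassifyOp
        rw [if_neg (by simp [hrB])]
      rw [hstep, hcls]
      have hupd : pvUpd (op :: rest) i nr =
          pvUpd rest i (op.2.foldl (fun d t => d.insert t i) nr) := by
        unfold pvUpd
        rw [List.foldl_cons, if_neg hr]
      rw [hupd]
      refine ih _ _ hDp.2 ?_
      intro op' hop' hro t ht
      rw [pvGetD_insert_fold]
      have hdisj := hDp.1 op' hop'
      have : t ∉ op.2 := fun hmem => hdisj t hmem ht
      rw [if_neg this]
      exact hH op' (List.mem_cons_of_mem _ hop') hro t ht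

-- pure per-layer classification tables
def pvCls (L : List (List (String × List Int))) (k : Nat) :
    List (String × List Int) × List (Int × (String × List Int)) :=
  (PySem.List.pyGetD L (k : Int) []).foldl
    (pvClassifyOp (pvUses L) (L.length : Int) (k : Int)) ([], [])

-- backward outer loop of the machine = the pure tables, layer by layer
lemma pvMOuter (L : List (List (String × List Int))) (q : Int)
    (hDisj : ∀ i : Int, 0 ≤ i → (PySem.List.pyGetD L i []).Pairwise pvDisj)
    (hT : ∀ i : Int, 0 ≤ i → ∀ op ∈ PySem.List.pyGetD L i [], ∀ t ∈ op.2, 0 ≤ t ∧ t < q) :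
    ∀ (m : Nat), m ≤ L.length →
    ∀ (nr : PySem.Dict Int Int) (kv : List (List (String × List Int)))
      (P : List (Int × (String × List Int))),
      (∀ t, 0 ≤ t → t < q →
        nr.getD t 0 = pvFirstAfter ((pvUses L).getD t []) ((m : Int) - 1) (L.length : Int)) →
      ((PySem.List.pyRange ((m : Int) - 1) (-1) (-1)).foldl (pvMStep L) (nr, kv, P)).2.1 =
        kv ++ ((List.range m).reverse.map (fun k => (pvCls L k).1)) ∧
      ((PySem.List.pyRange ((m : Int) - 1) (-1) (-1)).foldl (pvMStep L) (nr, kv, P)).2.2 =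
        P ++ (((List.range m).reverse.map (fun k => (pvCls L k).2)).flatten) := by
  intro m
  induction m with
  | zero =>
    intro _ nr kv P _
    rw [PySem.List.pyRange_neg_one_eq_nil (by omega)]
    simp
  | succ m ih =>
    intro hm nr kv P hSnap
    have hcons := PySem.List.pyRange_neg_one_cons
      (a := ((m + 1 : Nat) : Int) - 1) (b := -1) (by omega)
    rw [show ((m + 1 : Nat) : Int) - 1 - 1 = ((m : Nat) : Int) - 1 from by omega] at hcons
    rw [hcons]
    rw [List.foldl_cons]
    have e1 : ((m + 1 : Nat) : Int) - 1 = ((m : Nat) : Int) := by omega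
    set lay := PySem.List.pyGetD L (((m + 1 : Nat) : Int) - 1) [] with hlay
    have hlay' : lay = PySem.List.pyGetD L ((m : Nat) : Int) [] := by rw [hlay, e1]
    have hHn : ∀ op ∈ lay, pvIsReset op.1 = true → ∀ t ∈ op.2,
        nr.getD t 0 = pvFirstAfter ((pvUses L).getD t []) (((m + 1 : Nat) : Int) - 1) (L.length : Int) := by
      intro op hop _ t ht
      have := hT ((m : Nat) : Int) (by positivity) op (by rwa [← hlay']) t ht
      exact hSnap t this.1 this.2
    have hstep : pvMStep L (nr, kv, P) (((m + 1 : Nat) : Int) - 1) =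
        (pvUpd lay (((m + 1 : Nat) : Int) - 1) nr, kv ++ [(pvCls L m).1], P ++ (pvCls L m).2) := by
      unfold pvMStep
      rw [← hlay]
      rw [pvMLayer _ _ _ lay nr ([], P)
        (by rw [hlay']; exact hDisj _ (by positivity)) hHn]
      rw [pvCls_offset]
      have : lay.foldl (pvClassifyOp (pvUses L) (L.length : Int) (((m + 1 : Nat) : Int) - 1)) ([], []) =
          pvCls L m := by
        unfold pvCls
        rw [← hlay', e1]
      rw [this]
      simp
    rw [hstep]
    have hSnap' : ∀ t, 0 ≤ t → t < q →
        (pvUpd lay (((m + 1 : Nat) : Int) - 1) nr).getD t 0 =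
          pvFirstAfter ((pvUses L).getD t []) (((m : Nat) : Int) - 1) (L.length : Int) := by
      intro t h0 h1
      rw [pvUpd_getD]
      rw [show ((m : Nat) : Int) - 1 = ((m : Nat) : Int) - 1 from rfl]
      rw [pvSnap_step L t ((m : Nat) : Int) (by positivity) (by omega)]
      rw [e1, ← hlay']
      by_cases h : pvUsedAt lay t
      · rw [if_pos h, if_pos h]
      · rw [if_neg h, if_neg h]
        rw [hSnap t h0 h1, e1]
    obtain ⟨r1, r2⟩ := ih (by omega) _ (kv ++ [(pvCls L m).1]) (P ++ (pvCls L m).2) hSnap'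
    refine ⟨?_, ?_⟩
    · rw [r1]
      rw [List.range_succ, List.reverse_append, List.map_append]
      simp
    · rw [r2]
      rw [List.range_succ, List.reverse_append, List.map_append]
      simp



lemma pvFoldl_pairmap {γ β1 β2 : Type} {f1 : γ → β1} {f2 : γ → β2} :
    ∀ (l : List γ) (a : List β1) (b : List β2),
      l.foldl (fun acc p => (acc.1 ++ [f1 p], acc.2 ++ [f2 p])) (a, b) =
        (a ++ l.map f1, b ++ l.map f2) := by
  intro l
  induction l with
  | nil => intro a b; simp
  | cons x xs ih =>
    intro a b
    rw [List.foldl_cons]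
    show xs.foldl _ (a ++ [f1 x], b ++ [f2 x]) = _
    rw [ih]
    simp

-- B's classification tables, componentwise
lemma pvClassify_eq (U : PySem.Dict Int (List Int)) (n : Int)
    (L : List (List (String × List Int))) :
    pvClassify U n L =
      ((PySem.List.enumerate L).map (fun p => (p.2.foldl (pvClassifyOp U n p.1) ([], [])).1),
       (PySem.List.enumerate L).map (fun p => (p.2.foldl (pvClassifyOp U n p.1) ([], [])).2)) := by
  unfold pvClassify
  change (PySem.List.enumerate L).foldl
    (fun (acc : List (List (String × List Int)) × List (List (Int × (String × List Int)))) p =>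
      (acc.1 ++ [(p.2.foldl (pvClassifyOp U n p.1) ([], [])).1],
       acc.2 ++ [(p.2.foldl (pvClassifyOp U n p.1) ([], [])).2])) ([], []) = _
  rw [pvFoldl_pairmap]
  simp

lemma pvClassify_pair (L : List (List (String × List Int))) :
    pvClassify (pvUses L) (L.length : Int) L =
      ((List.range L.length).map (fun k => (pvCls L k).1),
       (List.range L.length).map (fun k => (pvCls L k).2)) := by
  rw [pvClassify_eq]
  congr 1
  · apply List.ext_getElem
    · simp [PySem.List.length_enumerate]
    · intro k hk1 hk2
      rw [List.length_map, PySem.List.length_enumerate] at hk1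
      simp only [List.getElem_map, PySem.List.getElem_enumerate, List.getElem_range]
      unfold pvCls
      rw [PySem.List.pyGetD_eq_getElem _ _ (by positivity) (by push_cast; omega)]
      rw [show ((0 : Int) + (k : Nat)) = ((k : Nat) : Int) from by omega]
      simp
  · apply List.ext_getElem
    · simp [PySem.List.length_enumerate]
    · intro k hk1 hk2
      rw [List.length_map, PySem.List.length_enumerate] at hk1
      simp only [List.getElem_map, PySem.List.getElem_enumerate, List.getElem_range]
      unfold pvCls
      rw [PySem.List.pyGetD_eq_getElem _ _ (by positivity) (by push_cast; omega)]
      rw [show ((0 : Int) + (k : Nat)) = ((k : Nat) : Int) from by omega]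
      simp

-- ===== VERDICT (by name: the statement is the Claim_ definition above) =====
theorem layer_circuit_ops_py_spec : Claim_equal_layer_circuit_ops_py := by
  intro ops q hDom hPre
  unfold Spec_layer_circuit_ops_py layer_circuit_ops_py layer_circuit_ops_py_alt
  rw [← pvPass1_eq ops q]
  simp only []
  set L := pvPass1 ops q with hL
  set n := L.length with hn
  set U := pvUses L with hU
  set PM := ((List.range n).reverse.map (fun k => (pvCls L k).2)).flatten with hPM
  set G := fun (k : Nat) => (pvCls L k).1 ++
    ((PM.filter (fun p => p.1 == (k : Int))).map (·.2)) with hG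
  -- layer facts from pass 1
  have hMD := pvPass1_inv ops ops
    ((PySem.List.pyRange 0 q 1).foldl (fun d qq => d.insert qq 0) PySem.Dict.empty) []
    (fun op h => h)
    (by intro i hi op hop; rw [pvGetD_oob _ _ _ (by simp; omega)] at hop; cases hop)
    (by intro i hi op hop; rw [pvGetD_oob _ _ _ (by simp; omega)] at hop; cases hop)
    (by
      intro t
      rw [pvGetD_insert_fold]
      by_cases h : t ∈ PySem.List.pyRange 0 q 1 <;> simp [h, PySem.Dict.getD_empty])
    (by intro i hi; rw [pvGetD_oob _ _ _ (by simp; omega)]; exact List.Pairwise.nil)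
  have hMem : ∀ i : Int, 0 ≤ i → ∀ op ∈ PySem.List.pyGetD L i [], op ∈ ops := hMD.1
  have hDisj : ∀ i : Int, 0 ≤ i → (PySem.List.pyGetD L i []).Pairwise pvDisj := hMD.2
  have hT : ∀ i : Int, 0 ≤ i → ∀ op ∈ PySem.List.pyGetD L i [], ∀ t ∈ op.2, 0 ≤ t ∧ t < q :=
    fun i hi op hop t ht => hPre op (hMem i hi op hop) t ht
  -- initial snapshot of next_required
  have hSnap0 : ∀ t, 0 ≤ t → t < q →
      (pvInitNR q (n : Int)).getD t 0 =
        pvFirstAfter (U.getD t []) ((n : Int) - 1) (L.length : Int) := by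
    intro t h0 h1
    unfold pvInitNR
    rw [pvGetD_insert_fold, if_pos (PySem.List.mem_pyRange_one.mpr ⟨h0, h1⟩)]
    rw [hU, pvSnap_init]
  -- the machine's tables
  obtain ⟨hKV, hPMm⟩ := pvMOuter L q hDisj hT n (by omega) (pvInitNR q (n : Int)) [] [] hSnap0
  -- A's output via the old hybrid-list argument
  have hinit : L = L.take n ++ pvAsm (n : Int) [] [] := by simp [pvAsm, hn]
  have hout := pvOuter L n (by omega) [] [] (pvInitNR q (n : Int)) (by simp [hn])
    (by intro p hp; cases hp) (pvInitNR_NB _ _ (by positivity))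
  rw [← hinit] at hout
  rw [hout]
  rw [hKV, hPMm]
  simp only [List.nil_append]
  -- A's assembled layers are exactly G
  have hA : pvAsm 0 ((List.range n).reverse.map (fun k => (pvCls L k).1)) PM =
      (List.range n).map G := by
    apply List.ext_getElem
    · simp [pvAsm_length]
    · intro k hk1 hk2
      have hkn : k < n := by simpa using hk2
      rw [pvAsm_getElem _ _ _ k (by simpa using hkn)]
      simp only [List.getElem_map, List.getElem_range, hG]
      have hrev : ((List.range n).reverse.map (fun k => (pvCls L k).1)).reverse =
          (List.range n).map (fun k => (pvCls L k).1) := by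
        rw [← List.map_reverse, List.reverse_reverse]
      simp only [hrev, List.getElem_map, List.getElem_range]
      rw [show ((0 : Int) + (k : Nat)) = ((k : Nat) : Int) from by omega]
  rw [hA]
  -- B's assembled layers are exactly G too
  set kp := pvClassify U (n : Int) L with hkp
  set fj := fun (j : Int) => PySem.List.pyGetD kp.1 j [] ++
      kp.2.reverse.flatMap (fun ps => (ps.filter (fun p => p.1 == j)).map (·.2)) with hfj
  have hfold : (PySem.List.pyRange 0 (n : Int) 1).foldl
      (fun out j =>
        let lay := PySem.List.pyGetD kp.1 j [] ++
          kp.2.reverse.flatMap (fun ps => (ps.filter (fun p => p.1 == j)).map (·.2))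
        if lay.isEmpty then out else out ++ [lay]) [] =
      ((PySem.List.pyRange 0 (n : Int) 1).filter (fun j => !(fj j).isEmpty)).map fj := by
    rw [PySem.List.foldl_congr_mem _ _
      (fun out j => if (fun j => !(fj j).isEmpty) j then out ++ [fj j] else out) _
      (by
        intro acc j _
        simp only [hfj]
        cases h : (PySem.List.pyGetD kp.1 j [] ++
          kp.2.reverse.flatMap (fun ps => (ps.filter (fun p => p.1 == j)).map (·.2))).isEmpty <;>
          simp [h])]
    rw [PySem.List.foldl_append_if]
    rfl
  rw [hfold]
  have hswap : ((PySem.List.pyRange 0 (n : Int) 1).filter (fun j => !(fj j).isEmpty)).map fj =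
      ((PySem.List.pyRange 0 (n : Int) 1).map fj).filter (fun lay => !lay.isEmpty) := by
    rw [List.filter_map]
    rfl
  rw [hswap]
  -- elementwise: fj ∘ cast = G
  have hkp1 : kp.1 = (List.range n).map (fun k => (pvCls L k).1) := by
    rw [hkp, hU, hn, pvClassify_pair]
  have hkp2 : kp.2 = (List.range n).map (fun k => (pvCls L k).2) := by
    rw [hkp, hU, hn, pvClassify_pair]
  have helem : ∀ k : Nat, k < n → fj ((k : Nat) : Int) = G k := by
    intro k hk
    rw [hfj]
    simp only []
    congr 1
    · rw [hkp1]
      rw [PySem.List.pyGetD_eq_getElem _ _ (by positivity) (by simp; omega)]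
      simp
    · rw [hkp2, ← List.map_reverse]
      rw [List.flatMap_def, List.map_map]
      rw [hPM, List.filter_flatten, List.map_flatten, List.map_map]
      rw [List.map_map]
      simp only [Function.comp_def]
  rw [PySem.List.pyRange_zero_natCast, List.map_map]
  congr 1
  apply List.ext_getElem
  · simp
  · intro k hk1 hk2
    simp only [List.getElem_map, List.getElem_range, Function.comp_def]
    exact (helem k (by simpa using hk1)).symm
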